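-- pv_equiv track=rewrite | github.com/Emory-OMOP/info | scripts/update_dqd_summary.py | compute_dbt_diff
-- ===== SOURCE A (Python) =====
-- def compute_dbt_diff(
--     prev_tests: list[dict] | None,
--     curr_tests: list[dict],
-- ) -> dict:
--     """Compute diff between two releases' DBT tests."""
--     curr_by_id = {t["unique_id"]: t for t in curr_tests}
--     curr_ids = set(curr_by_id)
--
--     if prev_tests is None:
--         return {"added": curr_tests, "removed": [], "status_changes": []}
--
--     prev_by_id = {t["unique_id"]: t for t in prev_tests}
--     prev_ids = set(prev_by_id)
--
--     added = [curr_by_id[uid] for uid in sorted(curr_ids - prev_ids)]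
--     removed = [prev_by_id[uid] for uid in sorted(prev_ids - curr_ids)]
--
--     status_changes = []
--     for uid in sorted(curr_ids & prev_ids):
--         prev_status = prev_by_id[uid].get("status", "")
--         curr_status = curr_by_id[uid].get("status", "")
--         if prev_status != curr_status:
--             status_changes.append({
--                 **curr_by_id[uid],
--                 "prev_status": prev_status,
--                 "curr_status": curr_status,
--             })
--
--     return {"added": added, "removed": removed, "status_changes": status_changes}
-- ===== SOURCE B (Python) =====
-- def compute_dbt_diff(
--     prev_tests,
--     curr_tests,
-- ):
--     """Compute diff between two releases' DBT tests via a two-pointer merge of the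
--     two sorted id lists (no set operations, no membership tests)."""
--     curr_by_id = {t["unique_id"]: t for t in curr_tests}
--     if prev_tests is None:
--         return {"added": curr_tests, "removed": [], "status_changes": []}
--
--     prev_by_id = {t["unique_id"]: t for t in prev_tests}
--     ck = sorted(curr_by_id)
--     pk = sorted(prev_by_id)
--
--     added, removed, status_changes = [], [], []
--     i = j = 0
--     while i < len(ck) and j < len(pk):
--         if ck[i] < pk[j]:
--             added.append(curr_by_id[ck[i]])
--             i += 1
--         elif pk[j] < ck[i]:
--             removed.append(prev_by_id[pk[j]])
--             j += 1
--         else: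
--             uid = ck[i]
--             prev_status = prev_by_id[uid].get("status", "")
--             curr_status = curr_by_id[uid].get("status", "")
--             if prev_status != curr_status:
--                 status_changes.append({
--                     **curr_by_id[uid],
--                     "prev_status": prev_status,
--                     "curr_status": curr_status,
--                 })
--             i += 1
--             j += 1
--     added.extend(curr_by_id[u] for u in ck[i:])
--     removed.extend(prev_by_id[u] for u in pk[j:])
--     return {"added": added, "removed": removed, "status_changes": status_changes}
-- ===== Notes on version B (the rewrite author's own statement) =====
-- stated objective: alternative
-- what changed: A partitions ids with three set operations (difference, difference, intersection), each followed by its own sort and pass; B never forms a set difference/intersection or does a membership test: it sorts the two key lists once and runs a classic two-pointer merge walk that classifies each id by comparing the two heads.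
import Mathlib
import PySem

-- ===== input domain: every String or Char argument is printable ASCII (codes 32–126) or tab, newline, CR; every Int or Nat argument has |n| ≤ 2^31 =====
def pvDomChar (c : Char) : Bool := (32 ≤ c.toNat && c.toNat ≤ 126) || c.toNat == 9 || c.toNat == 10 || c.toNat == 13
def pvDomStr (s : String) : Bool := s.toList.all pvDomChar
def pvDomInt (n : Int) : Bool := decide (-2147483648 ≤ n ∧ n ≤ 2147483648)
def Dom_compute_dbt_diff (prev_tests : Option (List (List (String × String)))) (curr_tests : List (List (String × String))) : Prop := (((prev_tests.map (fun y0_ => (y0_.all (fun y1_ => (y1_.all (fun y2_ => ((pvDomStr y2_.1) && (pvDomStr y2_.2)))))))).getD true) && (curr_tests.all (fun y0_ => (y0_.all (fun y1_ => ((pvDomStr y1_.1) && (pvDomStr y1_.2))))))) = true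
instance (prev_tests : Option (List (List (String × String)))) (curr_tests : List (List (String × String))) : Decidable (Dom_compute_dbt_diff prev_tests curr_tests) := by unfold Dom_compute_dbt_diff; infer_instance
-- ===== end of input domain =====

-- B replaces A's three set operations (two differences and an intersection, each sorted and
-- scanned separately) by a two-pointer merge walk over the two sorted key lists (alternative
-- algorithm, same asymptotic cost).

-- ===== PORT A =====
-- shared helpers (both Pythons build the same by-id dict and read the same dict fields):
-- t["unique_id"]; under Pre_ the key is present, so the "" default is never taken
def pvKeyOf (t : List (String × String)) : String := (PySem.Dict.mk t).getD "unique_id" ""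
-- {t["unique_id"]: t for t in ts}
def pvById (ts : List (List (String × String))) : PySem.Dict String (List (String × String)) :=
  ts.foldl (fun d t => d.insert (pvKeyOf t) t) PySem.Dict.empty
-- t.get("status", "")
def pvStatus (t : List (String × String)) : String := (PySem.Dict.mk t).getD "status" ""
-- {**t, "prev_status": ps, "curr_status": cs}
def pvChangeEntry (t : List (String × String)) (ps cs : String) : List (String × String) :=
  (((PySem.Dict.mk t).insert "prev_status" ps).insert "curr_status" cs).items

def compute_dbt_diff (prev_tests : Option (List (List (String × String)))) (curr_tests : List (List (String × String))) : List (String × List (List (String × String))) :=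
  let curr_by_id := pvById curr_tests
  let curr_ids : PySem.Set String := PySem.Set.ofList curr_by_id.keys
  match prev_tests with
  | none => [("added", curr_tests), ("removed", []), ("status_changes", [])]
  | some prev_tests =>
    let prev_by_id := pvById prev_tests
    let prev_ids : PySem.Set String := PySem.Set.ofList prev_by_id.keys
    let added := (PySem.List.sorted (curr_ids.diff prev_ids) (fun x => x)).map
      (fun uid => curr_by_id.getD uid [])
    let removed := (PySem.List.sorted (prev_ids.diff curr_ids) (fun x => x)).map
      (fun uid => prev_by_id.getD uid [])
    let status_changes := (PySem.List.sorted (curr_ids.inter prev_ids) (fun x => x)).foldl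
      (fun acc uid =>
        if pvStatus (prev_by_id.getD uid []) ≠ pvStatus (curr_by_id.getD uid []) then
          acc ++ [pvChangeEntry (curr_by_id.getD uid []) (pvStatus (prev_by_id.getD uid [])) (pvStatus (curr_by_id.getD uid []))]
        else acc) []
    [("added", added), ("removed", removed), ("status_changes", status_changes)]

-- ===== PORT B =====
-- the two-pointer merge walk of Source B: the `while i < len(ck) and j < len(pk)` loop, carrying
-- the three accumulators, followed by the two `extend`s on the leftover tails
def pvMergeB (C P : PySem.Dict String (List (String × String))) :
    List String → List String →
    List (List (String × String)) × List (List (String × String)) × List (List (String × String)) →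
    List (List (String × String)) × List (List (String × String)) × List (List (String × String))
  | [], ys, acc => (acc.1, acc.2.1 ++ ys.map (fun u => P.getD u []), acc.2.2)
  | x :: xs, [], acc => (acc.1 ++ (x :: xs).map (fun u => C.getD u []), acc.2.1, acc.2.2)
  | x :: xs, y :: ys, acc =>
    if x < y then
      pvMergeB C P xs (y :: ys) (acc.1 ++ [C.getD x []], acc.2.1, acc.2.2)
    else if y < x then
      pvMergeB C P (x :: xs) ys (acc.1, acc.2.1 ++ [P.getD y []], acc.2.2)
    else
      let ps := pvStatus (P.getD x [])
      let cs := pvStatus (C.getD x [])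
      pvMergeB C P xs ys
        (acc.1, acc.2.1,
         if ps ≠ cs then acc.2.2 ++ [pvChangeEntry (C.getD x []) ps cs] else acc.2.2)
  termination_by xs ys _ => xs.length + ys.length

def compute_dbt_diff_alt (prev_tests : Option (List (List (String × String)))) (curr_tests : List (List (String × String))) : List (String × List (List (String × String))) :=
  let curr_by_id := pvById curr_tests
  match prev_tests with
  | none => [("added", curr_tests), ("removed", []), ("status_changes", [])]
  | some prev_tests =>
    let prev_by_id := pvById prev_tests
    let ck := PySem.List.sorted curr_by_id.keys (fun x => x)
    let pk := PySem.List.sorted prev_by_id.keys (fun x => x)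
    let res := pvMergeB curr_by_id prev_by_id ck pk ([], [], [])
    [("added", res.1), ("removed", res.2.1), ("status_changes", res.2.2)]

-- ===== PRECONDITION & SPEC =====
-- Pre_ excludes exactly the inputs on which A raises KeyError: a test dict without a "unique_id" key.
def Pre_compute_dbt_diff (prev_tests : Option (List (List (String × String)))) (curr_tests : List (List (String × String))) : Prop :=
  (∀ t ∈ curr_tests, "unique_id" ∈ t.map Prod.fst) ∧
  (∀ l, prev_tests = some l → ∀ t ∈ l, "unique_id" ∈ t.map Prod.fst)
instance (prev_tests : Option (List (List (String × String)))) (curr_tests : List (List (String × String))) : Decidable (Pre_compute_dbt_diff prev_tests curr_tests) := by unfold Pre_compute_dbt_diff; infer_instance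
def pvWitness_compute_dbt_diff : (Option (List (List (String × String)))) × (List (List (String × String))) :=
  (some [[("unique_id", "a"), ("status", "pass")]], [[("unique_id", "a"), ("status", "fail")], [("unique_id", "b")]])

def Spec_compute_dbt_diff (prev_tests : Option (List (List (String × String)))) (curr_tests : List (List (String × String))) (out : List (String × List (List (String × String)))) : Prop := out = compute_dbt_diff_alt prev_tests curr_tests
instance (prev_tests : Option (List (List (String × String)))) (curr_tests : List (List (String × String))) (out : List (String × List (List (String × String)))) : Decidable (Spec_compute_dbt_diff prev_tests curr_tests out) := by unfold Spec_compute_dbt_diff; infer_instance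

-- ===== CLAIM (what is proved, stated in full; the proofs are below) =====
def Claim_equal_compute_dbt_diff : Prop := ∀ (prev_tests : Option (List (List (String × String)))) (curr_tests : List (List (String × String))), Dom_compute_dbt_diff prev_tests curr_tests → Pre_compute_dbt_diff prev_tests curr_tests → Spec_compute_dbt_diff prev_tests curr_tests (compute_dbt_diff prev_tests curr_tests)

-- ===== LEMMAS AND PROOFS =====

-- the "status change" record produced at id uid, shared shape of both loops
def pvChg (C P : PySem.Dict String (List (String × String))) (uid : String) : Option (List (String × String)) :=
  if pvStatus (P.getD uid []) ≠ pvStatus (C.getD uid []) then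
    some (pvChangeEntry (C.getD uid []) (pvStatus (P.getD uid [])) (pvStatus (C.getD uid [])))
  else none

-- characterisation of the merge walk on strictly increasing inputs
lemma contains_eq_decide (l : List String) (a : String) : l.contains a = decide (a ∈ l) := by
  by_cases h : a ∈ l <;> simp [h]

lemma mergeB_spec (C P : PySem.Dict String (List (String × String))) :
    ∀ xs : List String, xs.Pairwise (· < ·) → ∀ ys : List String, ys.Pairwise (· < ·) →
    ∀ a r c : List (List (String × String)),
    pvMergeB C P xs ys (a, r, c) =
      (a ++ (xs.filter (fun u => !ys.contains u)).map (fun u => C.getD u []),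
       r ++ (ys.filter (fun u => !xs.contains u)).map (fun u => P.getD u []),
       c ++ (xs.filter (fun u => ys.contains u)).filterMap (pvChg C P)) := by
  intro xs
  induction xs with
  | nil =>
    intro _ ys _ a r c
    simp [pvMergeB]
  | cons x xs ih =>
    intro hxs ys
    induction ys with
    | nil =>
      intro _ a r c
      simp [pvMergeB]
    | cons y ys ihy =>
      intro hys a r c
      have hxall : ∀ u ∈ xs, x < u := fun u hu => (List.pairwise_cons.mp hxs).1 u hu
      have hyall : ∀ u ∈ ys, y < u := fun u hu => (List.pairwise_cons.mp hys).1 u hu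
      have hxs' : xs.Pairwise (· < ·) := (List.pairwise_cons.mp hxs).2
      have hys' : ys.Pairwise (· < ·) := (List.pairwise_cons.mp hys).2
      rcases lt_trichotomy x y with hlt | heq | hgt
      · -- x < y : x is only in curr
        have hxm : x ∉ y :: ys := by
          intro h
          rcases List.mem_cons.mp h with h | h
          · exact absurd h (ne_of_lt hlt)
          · exact absurd rfl (ne_of_lt (lt_trans hlt (hyall x h)))
        have hxnot : ((y :: ys).contains x) = false := by simpa using hxm
        have hfilt : ∀ u ∈ y :: ys, ((x :: xs).contains u) = (xs.contains u) := by
          intro u hu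
          have hyu : y ≤ u := by
            rcases List.mem_cons.mp hu with h | h
            · exact le_of_eq h.symm
            · exact le_of_lt (hyall u h)
          have hne : u ≠ x := ne_of_gt (lt_of_lt_of_le hlt hyu)
          simp [hne]
        have h1 : (y :: ys).filter (fun u => !(x :: xs).contains u)
            = (y :: ys).filter (fun u => !xs.contains u) :=
          List.filter_congr (fun u hu => by rw [hfilt u hu])
        rw [pvMergeB, if_pos hlt, ih hxs' (y :: ys) hys _ _ _]
        simp only [List.filter_cons, hxnot, h1]
        simp
      · -- x = y : in both
        subst heq
        have hyin : ((x :: ys).contains x) = true := by simp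
        have hfx : ∀ u ∈ xs, ((x :: ys).contains u) = (ys.contains u) := by
          intro u hu
          have hne : u ≠ x := ne_of_gt (hxall u hu)
          simp [hne]
        have hfy : ∀ u ∈ ys, ((x :: xs).contains u) = (xs.contains u) := by
          intro u hu
          have hne : u ≠ x := ne_of_gt (hyall u hu)
          simp [hne]
        have h1 : xs.filter (fun u => !(x :: ys).contains u)
            = xs.filter (fun u => !ys.contains u) :=
          List.filter_congr (fun u hu => by rw [hfx u hu])
        have h2 : ys.filter (fun u => !(x :: xs).contains u)
            = ys.filter (fun u => !xs.contains u) :=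
          List.filter_congr (fun u hu => by rw [hfy u hu])
        have h3 : xs.filter (fun u => (x :: ys).contains u)
            = xs.filter (fun u => ys.contains u) :=
          List.filter_congr (fun u hu => by rw [hfx u hu])
        rw [pvMergeB, if_neg (lt_irrefl x), if_neg (lt_irrefl x)]
        simp only
        rw [ih hxs' ys hys' _ _ _]
        simp only [List.filter_cons, hyin, h1, h2, h3]
        by_cases h : pvStatus (P.getD x []) ≠ pvStatus (C.getD x [])
        · have hc : pvChg C P x = some (pvChangeEntry (C.getD x []) (pvStatus (P.getD x [])) (pvStatus (C.getD x []))) := by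
            simp only [pvChg]; rw [if_pos h]
          simp [h, hc]
        · have hc : pvChg C P x = none := by simp only [pvChg]; rw [if_neg h]
          simp only [if_neg h]
          simp [hc]
      · -- y < x : y is only in prev
        have hym : y ∉ x :: xs := by
          intro h
          rcases List.mem_cons.mp h with h | h
          · exact absurd h (ne_of_lt hgt)
          · exact absurd rfl (ne_of_lt (lt_trans hgt (hxall y h)))
        have hynot : ((x :: xs).contains y) = false := by simpa using hym
        have hfilt : ∀ u ∈ x :: xs, ((y :: ys).contains u) = (ys.contains u) := by
          intro u hu
          have hxu : x ≤ u := by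
            rcases List.mem_cons.mp hu with h | h
            · exact le_of_eq h.symm
            · exact le_of_lt (hxall u h)
          have hne : u ≠ y := ne_of_gt (lt_of_lt_of_le hgt hxu)
          simp [hne]
        have h1 : (x :: xs).filter (fun u => !(y :: ys).contains u)
            = (x :: xs).filter (fun u => !ys.contains u) :=
          List.filter_congr (fun u hu => by rw [hfilt u hu])
        have h2 : (x :: xs).filter (fun u => (y :: ys).contains u)
            = (x :: xs).filter (fun u => ys.contains u) :=
          List.filter_congr (fun u hu => by rw [hfilt u hu])
        rw [pvMergeB, if_neg (not_lt_of_gt hgt), if_pos hgt, ihy hys' _ _ _]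
        simp only [List.filter_cons, hynot, h1, h2]
        simp

-- A's intersection loop is a filterMap over the sorted intersection
lemma foldA_spec (C P : PySem.Dict String (List (String × String))) (l : List String)
    (c : List (List (String × String))) :
    l.foldl (fun acc uid =>
        if pvStatus (P.getD uid []) ≠ pvStatus (C.getD uid []) then
          acc ++ [pvChangeEntry (C.getD uid []) (pvStatus (P.getD uid [])) (pvStatus (C.getD uid []))]
        else acc) c =
      c ++ l.filterMap (pvChg C P) := by
  induction l generalizing c with
  | nil => simp
  | cons x xs ih =>
    rw [List.foldl_cons, List.filterMap_cons]
    by_cases h : pvStatus (P.getD x []) ≠ pvStatus (C.getD x []) 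
    · have hc : pvChg C P x = some (pvChangeEntry (C.getD x []) (pvStatus (P.getD x [])) (pvStatus (C.getD x []))) := by
        simp only [pvChg]; rw [if_pos h]
      rw [if_pos h, ih, hc]; simp
    · have hc : pvChg C P x = none := by simp only [pvChg]; rw [if_neg h]
      rw [if_neg h, ih, hc]

lemma nodup_keys_byId (ts : List (List (String × String))) : (pvById ts).keys.Nodup := by
  unfold pvById
  exact PySem.Dict.nodup_keys_foldl_insert_key ts pvKeyOf (fun _ t => t) PySem.Dict.empty (by simp)

-- filtering the sorted nodup list by p IS the sorted restriction D
lemma sorted_filter (ck : List String) (hck : ck.Nodup) (p : String → Bool)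
    (D : List String) (hD : D.Nodup) (hmem : ∀ a, a ∈ D ↔ a ∈ ck ∧ p a = true) :
    (PySem.List.sorted ck (fun x => x)).filter p = PySem.List.sorted D (fun x => x) := by
  have hperm : (PySem.List.sorted ck (fun x => x)).Perm ck := PySem.List.sorted_perm ck (fun x => x) false
  have hnd : (PySem.List.sorted ck (fun x => x)).Nodup := hperm.nodup_iff.mpr hck
  have hle : (PySem.List.sorted ck (fun x => x)).Pairwise (fun a b => a ≤ b) :=
    PySem.List.sorted_pairwise ck (fun x => x)
  have hlt : (PySem.List.sorted ck (fun x => x)).Pairwise (· < ·) := by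
    have := hle.and hnd
    exact this.imp (fun h => lt_of_le_of_ne h.1 h.2)
  have hfiltlt := hlt.filter p
  have hfilnd : ((PySem.List.sorted ck (fun x => x)).filter p).Nodup :=
    hfiltlt.imp (fun h => ne_of_lt h)
  refine (PySem.List.sorted_eq_of_perm_of_pairwise_lt D _ (fun x => x) ?_ hfiltlt).symm
  rw [List.perm_ext_iff_of_nodup hfilnd hD]
  intro a
  rw [List.mem_filter, hmem a, hperm.mem_iff]

-- ===== VERDICT (by name: the statement is the Claim_ definition above) =====
theorem compute_dbt_diff_spec : Claim_equal_compute_dbt_diff := by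
  intro prev_tests curr_tests _hdom _hpre
  unfold Spec_compute_dbt_diff
  cases prev_tests with
  | none => rfl
  | some p =>
    simp only [compute_dbt_diff, compute_dbt_diff_alt]
    have hck := nodup_keys_byId curr_tests
    have hpk := nodup_keys_byId p
    set C := pvById curr_tests with hCdef
    set P := pvById p with hPdef
    have hofc : PySem.Set.ofList C.keys = C.keys := PySem.Set.ofList_eq_self_of_nodup C.keys hck
    have hofp : PySem.Set.ofList P.keys = P.keys := PySem.Set.ofList_eq_self_of_nodup P.keys hpk
    have hsp : (PySem.List.sorted C.keys (fun x => x)).Pairwise (· < ·) := by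
      have hperm : (PySem.List.sorted C.keys (fun x => x)).Perm C.keys := PySem.List.sorted_perm _ _ false
      exact ((PySem.List.sorted_pairwise C.keys (fun x => x)).and (hperm.nodup_iff.mpr hck)).imp
        (fun h => lt_of_le_of_ne h.1 h.2)
    have hsq : (PySem.List.sorted P.keys (fun x => x)).Pairwise (· < ·) := by
      have hperm : (PySem.List.sorted P.keys (fun x => x)).Perm P.keys := PySem.List.sorted_perm _ _ false
      exact ((PySem.List.sorted_pairwise P.keys (fun x => x)).and (hperm.nodup_iff.mpr hpk)).imp
        (fun h => lt_of_le_of_ne h.1 h.2)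
    have hmq : ∀ a, ((PySem.List.sorted P.keys (fun x => x)).contains a) = decide (a ∈ P.keys) := by
      intro a
      rw [contains_eq_decide]
      simp [(PySem.List.sorted_perm P.keys (fun x => x) false).mem_iff]
    have hmp : ∀ a, ((PySem.List.sorted C.keys (fun x => x)).contains a) = decide (a ∈ C.keys) := by
      intro a
      rw [contains_eq_decide]
      simp [(PySem.List.sorted_perm C.keys (fun x => x) false).mem_iff]
    rw [mergeB_spec C P _ hsp _ hsq, foldA_spec]
    have hadded := sorted_filter C.keys hck
        (fun u => !(PySem.List.sorted P.keys (fun x => x)).contains u)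
        (PySem.Set.diff C.keys P.keys) (PySem.Set.nodup_diff C.keys P.keys hck)
        (by
          intro a
          rw [PySem.Set.mem_diff]
          simp)
    have hremoved := sorted_filter P.keys hpk
        (fun u => !(PySem.List.sorted C.keys (fun x => x)).contains u)
        (PySem.Set.diff P.keys C.keys) (PySem.Set.nodup_diff P.keys C.keys hpk)
        (by
          intro a
          rw [PySem.Set.mem_diff]
          simp)
    have hinter := sorted_filter C.keys hck
        (fun u => (PySem.List.sorted P.keys (fun x => x)).contains u)
        (PySem.Set.inter C.keys P.keys) (PySem.Set.nodup_inter C.keys P.keys hck)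
        (by
          intro a
          rw [PySem.Set.mem_inter]
          simp)
    rw [hofc, hofp]
    rw [hadded, hremoved, hinter]
    simp
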